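-- pv_equiv track=rewrite | github.com/Josephguogxy/TransCity-VLM | dataprocessing.py | _split_prompt_by_first_marker_block
-- ===== SOURCE A (Python) =====
-- from typing import List, Dict, Any, Optional, Tuple
--
-- CHUNK_MARKER = "[chunk token]"
--
-- IMAGE_MARKER = "[image token]"
--
-- def _split_prompt_by_first_marker_block(prompt: str) -> Tuple[str, str]:
--     """
--     A splitting strategy that works better for multi-turn prompts:
--     - find the first marker (chunk or image) position l
--     - starting from l, consume the contiguous block consisting of marker/whitespace/marker/...
--     - prefix=prompt[:l], suffix=prompt[r:]
--     - remove any remaining markers from suffix (avoid exposing marker text to the model)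
--     """
--     prompt = prompt or ""
--     idx_chunk = prompt.find(CHUNK_MARKER)
--     idx_img = prompt.find(IMAGE_MARKER)
--     idxs = [i for i in (idx_chunk, idx_img) if i >= 0]
--     if not idxs:
--         return prompt, ""
--
--     l = min(idxs)
--     r = l
--     # Consume a contiguous "whitespace + marker" block
--     while True:
--         advanced = False
--         while r < len(prompt) and prompt[r].isspace():
--             r += 1
--             advanced = True
--         if prompt.startswith(CHUNK_MARKER, r):
--             r += len(CHUNK_MARKER)
--             advanced = True
--             continue
--         if prompt.startswith(IMAGE_MARKER, r):
--             r += len(IMAGE_MARKER)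
--             advanced = True
--             continue
--         if not advanced:
--             break
--
--     pre = prompt[:l]
--     suf = prompt[r:]
--     # Clean residual markers in suffix (avoid semantic confusion from multiple marker occurrences)
--     suf = suf.replace(CHUNK_MARKER, "").replace(IMAGE_MARKER, "")
--     return pre, suf
-- ===== SOURCE B (Python) =====
-- CHUNK_MARKER = "[chunk token]"
-- IMAGE_MARKER = "[image token]"
-- _MLEN = len(CHUNK_MARKER)  # both markers have length 13
--
--
-- def _marker_starts(s):
--     """Index of every marker occurrence, in order, built in one scan.
--
--     Both markers contain '[' only at offset 0, so occurrences never overlap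
--     and the scan may jump a whole marker length after a hit.
--     """
--     occs = []
--     i = 0
--     n = len(s)
--     while i < n:
--         if s.startswith(CHUNK_MARKER, i) or s.startswith(IMAGE_MARKER, i):
--             occs.append(i)
--             i += _MLEN
--         else:
--             i += 1
--     return occs
--
--
-- def _split_prompt_by_first_marker_block(prompt):
--     prompt = prompt or ""
--     occs = _marker_starts(prompt)
--     if not occs:
--         return prompt, ""
--     l = occs[0]
--     # Fuse consecutive occurrences whose gap is whitespace-only into one block.
--     r = l + _MLEN
--     for p in occs[1:]:
--         if prompt[r:p].strip() != "":
--             break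
--         r = p + _MLEN
--     # Absorb trailing whitespace of the block.
--     tail = prompt[r:]
--     r += len(tail) - len(tail.lstrip())
--     suf = prompt[r:].replace(CHUNK_MARKER, "").replace(IMAGE_MARKER, "")
--     return prompt[:l], suf
-- ===== Notes on version B (the rewrite author's own statement) =====
-- stated objective: alternative
-- what changed: B first builds an index of ALL marker occurrences in one scan (exploiting that markers cannot overlap), then fuses consecutive occurrences whose gap is whitespace-only via slice+strip tests and absorbs trailing whitespace with an lstrip length difference, instead of A's find+min for the first marker followed by a nested character-pointer loop with a progress flag.
import Mathlib
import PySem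

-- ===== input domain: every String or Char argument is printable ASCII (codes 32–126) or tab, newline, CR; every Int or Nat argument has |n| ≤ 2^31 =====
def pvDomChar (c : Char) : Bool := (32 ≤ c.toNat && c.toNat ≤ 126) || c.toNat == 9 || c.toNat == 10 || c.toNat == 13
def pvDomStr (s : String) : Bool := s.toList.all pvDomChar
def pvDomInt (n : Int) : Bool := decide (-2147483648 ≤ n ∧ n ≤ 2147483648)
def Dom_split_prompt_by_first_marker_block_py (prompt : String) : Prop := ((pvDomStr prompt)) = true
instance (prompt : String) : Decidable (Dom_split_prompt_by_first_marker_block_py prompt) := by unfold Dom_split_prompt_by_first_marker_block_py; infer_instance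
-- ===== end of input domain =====

-- B replaces A's find+min plus nested pointer loop by a one-scan index of ALL marker
-- occurrences, then fuses consecutive occurrences whose gap is whitespace-only (slice+strip
-- tests) and absorbs trailing whitespace via lstrip (objective: alternative decomposition).
-- Loop recursions carry a fuel argument (cs.length + 1, always sufficient) purely to make the
-- recursion structural; it never changes a computed value.

-- ===== PORT A =====
def pvChunkM : List Char := "[chunk token]".toList   -- CHUNK_MARKER
def pvImgM : List Char := "[image token]".toList     -- IMAGE_MARKER

-- inner loop `while r < len(prompt) and prompt[r].isspace(): r += 1`
def pvWsLoopF : List Char → Nat → Nat → Nat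
  | _, 0, r => r
  | cs, fuel + 1, r =>
    match cs[r]? with
    | some c => if PySem.Chars.isspace c then pvWsLoopF cs fuel (r + 1) else r
    | none => r

def pvWsLoop (cs : List Char) (r : Nat) : Nat := pvWsLoopF cs (cs.length + 1) r

-- outer `while True:` block-consuming loop of A (pvWsLoop cs r = value of r after the inner
-- whitespace loop; the progress flag is exactly `pvWsLoop cs r ≠ r` when no marker matched)
def pvALoopF : List Char → Nat → Nat → Nat
  | _, 0, r => r
  | cs, fuel + 1, r =>
    if PySem.Chars.startswith (cs.drop (pvWsLoop cs r)) pvChunkM then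
      pvALoopF cs fuel (pvWsLoop cs r + pvChunkM.length)
    else if PySem.Chars.startswith (cs.drop (pvWsLoop cs r)) pvImgM then
      pvALoopF cs fuel (pvWsLoop cs r + pvImgM.length)
    else if pvWsLoop cs r ≠ r then
      pvALoopF cs fuel (pvWsLoop cs r)
    else
      pvWsLoop cs r

def pvALoop (cs : List Char) (r : Nat) : Nat := pvALoopF cs (cs.length + 1) r

def split_prompt_by_first_marker_block_py (prompt : String) : String × String :=
  let prompt2 := if prompt = "" then "" else prompt      -- `prompt = prompt or ""`
  let cs := prompt2.toList
  let idxChunk := PySem.Chars.find cs pvChunkM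
  let idxImg := PySem.Chars.find cs pvImgM
  let idxs := [idxChunk, idxImg].filter (fun i => decide (0 ≤ i))
  -- `if not idxs: return prompt, ""` and `l = min(idxs)` (min? is none exactly on the empty list)
  match PySem.List.min? idxs id with
  | none => (prompt2, "")
  | some l =>
      let r := pvALoop cs l.toNat      -- l ≥ 0 after the filter, so l.toNat is exact
      let pre := PySem.Chars.slice cs none (some l)
      let suf := PySem.Chars.replace
        (PySem.Chars.replace (PySem.Chars.slice cs (some (r : Int)) none) pvChunkM []) pvImgM []
      (String.ofList pre, String.ofList suf)

-- ===== PORT B =====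
-- `_marker_starts`: one scan collecting every marker occurrence (both markers have length 13)
def pvOccF : List Char → Nat → Nat → List Nat
  | _, 0, _ => []
  | cs, fuel + 1, i =>
    if i < cs.length then
      if PySem.Chars.startswith (cs.drop i) pvChunkM || PySem.Chars.startswith (cs.drop i) pvImgM then
        i :: pvOccF cs fuel (i + 13)
      else pvOccF cs fuel (i + 1)
    else []

def pvOcc (cs : List Char) (i : Nat) : List Nat := pvOccF cs (cs.length + 1) i

-- B's `for p in occs[1:]` gap-fusing loop (break ↦ returning r)
def pvGap : List Char → List Nat → Nat → Nat
  | _, [], r => r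
  | cs, p :: rest, r =>
    if PySem.Chars.strip (PySem.Chars.slice cs (some (r : Int)) (some (p : Int))) ≠ [] then r
    else pvGap cs rest (p + 13)

def split_prompt_by_first_marker_block_py_alt (prompt : String) : String × String :=
  let prompt2 := if prompt = "" then "" else prompt      -- `prompt = prompt or ""`
  let cs := prompt2.toList
  match pvOcc cs 0 with
  | [] => (prompt2, "")
  | l :: rest =>
      let r1 := pvGap cs rest (l + 13)
      let tail := PySem.Chars.slice cs (some (r1 : Int)) none
      let r := r1 + (tail.length - (PySem.Chars.lstrip tail).length)
      let suf := PySem.Chars.replace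
        (PySem.Chars.replace (PySem.Chars.slice cs (some (r : Int)) none) pvChunkM []) pvImgM []
      (String.ofList (PySem.Chars.slice cs none (some (l : Int))), String.ofList suf)

-- ===== PRECONDITION & SPEC =====
def Spec_split_prompt_by_first_marker_block_py (prompt : String) (out : String × String) : Prop := out = split_prompt_by_first_marker_block_py_alt prompt
instance (prompt : String) (out : String × String) : Decidable (Spec_split_prompt_by_first_marker_block_py prompt out) := by unfold Spec_split_prompt_by_first_marker_block_py; infer_instance

-- ===== CLAIM (what is proved, stated in full; the proofs are below) =====
def Claim_equal_split_prompt_by_first_marker_block_py : Prop := ∀ (prompt : String), Dom_split_prompt_by_first_marker_block_py prompt → Spec_split_prompt_by_first_marker_block_py prompt (split_prompt_by_first_marker_block_py prompt)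

-- ===== LEMMAS AND PROOFS =====

-- fuel does not matter as long as it exceeds cs.length - position
theorem pvWsLoopF_congr (cs : List Char) (f1 : Nat) :
    ∀ (f2 r : Nat), cs.length - r < f1 → cs.length - r < f2 →
      pvWsLoopF cs f1 r = pvWsLoopF cs f2 r := by
  induction f1 with
  | zero => intro f2 r h1 h2; omega
  | succ a ih =>
    intro f2 r h1 h2
    cases f2 with
    | zero => omega
    | succ b =>
      cases h : cs[r]? with
      | none => simp only [pvWsLoopF, h]
      | some c =>
        have hr : r < cs.length := (List.getElem?_eq_some_iff.mp h).1
        simp only [pvWsLoopF, h]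
        by_cases hws : PySem.Chars.isspace c = true
        · rw [if_pos hws, if_pos hws]
          exact ih b (r + 1) (by omega) (by omega)
        · rw [if_neg hws, if_neg hws]

theorem pvWsLoop_none (cs : List Char) (r : Nat) (h : cs[r]? = none) : pvWsLoop cs r = r := by
  unfold pvWsLoop
  simp only [pvWsLoopF, h]

theorem pvWsLoop_some (cs : List Char) (r : Nat) (c : Char) (h : cs[r]? = some c) :
    pvWsLoop cs r = if PySem.Chars.isspace c then pvWsLoop cs (r + 1) else r := by
  have hr : r < cs.length := (List.getElem?_eq_some_iff.mp h).1
  unfold pvWsLoop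
  simp only [pvWsLoopF, h]
  by_cases hws : PySem.Chars.isspace c = true
  · rw [if_pos hws, if_pos hws]
    exact pvWsLoopF_congr cs cs.length (cs.length + 1) (r + 1) (by omega) (by omega)
  · rw [if_neg hws, if_neg hws]

theorem pvWsLoop_le (cs : List Char) (r : Nat) : r ≤ pvWsLoop cs r := by
  cases h : cs[r]? with
  | none => rw [pvWsLoop_none cs r h]
  | some c =>
    rw [pvWsLoop_some cs r c h]
    split_ifs with hws
    · have h1 : r < cs.length := (List.getElem?_eq_some_iff.mp h).1
      have := pvWsLoop_le cs (r + 1)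
      omega
    · exact Nat.le_refl r
termination_by cs.length - r
decreasing_by
  have : r < cs.length := (List.getElem?_eq_some_iff.mp h).1
  omega

theorem pvWsLoop_eq_of_ge (cs : List Char) (r : Nat) (h : cs.length ≤ r) : pvWsLoop cs r = r :=
  pvWsLoop_none cs r (List.getElem?_eq_none_iff.mpr h)

-- a position carries a marker start
def pvP (cs : List Char) (j : Nat) : Prop := pvChunkM <+: cs.drop j ∨ pvImgM <+: cs.drop j

theorem pvMarker_facts {cs m : List Char} {r : Nat} (hlen : m.length = 13)
    (hh : m[0]? = some '[') (h : m <+: cs.drop r) :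
    r + 13 ≤ cs.length ∧ cs[r]? = some '[' := by
  obtain ⟨t, ht⟩ := h
  have hl := congrArg List.length ht
  simp only [List.length_append, List.length_drop, hlen] at hl
  refine ⟨by omega, ?_⟩
  have h0 : (cs.drop r)[0]? = some '[' := by
    rw [← ht, List.getElem?_append_left (by omega)]
    exact hh
  rw [List.getElem?_drop] at h0
  simpa using h0

theorem pvP_facts {cs : List Char} {j : Nat} (h : pvP cs j) :
    j + 13 ≤ cs.length ∧ cs[j]? = some '[' := by
  rcases h with h | h
  · exact pvMarker_facts rfl rfl h
  · exact pvMarker_facts rfl rfl h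

theorem pvP_iff_cond (cs : List Char) (i : Nat) :
    (PySem.Chars.startswith (cs.drop i) pvChunkM || PySem.Chars.startswith (cs.drop i) pvImgM) = true
      ↔ pvP cs i := by
  rw [Bool.or_eq_true, PySem.Chars.startswith_iff, PySem.Chars.startswith_iff]
  exact Iff.rfl

theorem pvALoopF_congr (cs : List Char) (f1 : Nat) :
    ∀ (f2 r : Nat), cs.length - r < f1 → cs.length - r < f2 →
      pvALoopF cs f1 r = pvALoopF cs f2 r := by
  induction f1 with
  | zero => intro f2 r h1 h2; omega
  | succ a ih =>
    intro f2 r h1 h2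
    cases f2 with
    | zero => omega
    | succ b =>
      simp only [pvALoopF]
      have hle := pvWsLoop_le cs r
      by_cases hc : PySem.Chars.startswith (cs.drop (pvWsLoop cs r)) pvChunkM = true
      · rw [if_pos hc, if_pos hc]
        have hlen : pvChunkM.length ≤ (cs.drop (pvWsLoop cs r)).length :=
          ((PySem.Chars.startswith_iff _ _).mp hc).length_le
        have h13 : pvChunkM.length = 13 := rfl
        simp only [List.length_drop] at hlen
        exact ih b (pvWsLoop cs r + pvChunkM.length) (by omega) (by omega)
      · rw [if_neg hc, if_neg hc]
        by_cases hi : PySem.Chars.startswith (cs.drop (pvWsLoop cs r)) pvImgM = true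
        · rw [if_pos hi, if_pos hi]
          have hlen : pvImgM.length ≤ (cs.drop (pvWsLoop cs r)).length :=
            ((PySem.Chars.startswith_iff _ _).mp hi).length_le
          have h13 : pvImgM.length = 13 := rfl
          simp only [List.length_drop] at hlen
          exact ih b (pvWsLoop cs r + pvImgM.length) (by omega) (by omega)
        · rw [if_neg hi, if_neg hi]
          by_cases hne : pvWsLoop cs r ≠ r
          · rw [if_pos hne, if_pos hne]
            have hrlt : r < cs.length := by
              by_contra hge
              exact hne (pvWsLoop_eq_of_ge cs r (by omega))
            exact ih b (pvWsLoop cs r) (by omega) (by omega)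
          · rw [if_neg hne, if_neg hne]

theorem pvALoop_step (cs : List Char) (r : Nat) :
    pvALoop cs r =
      if PySem.Chars.startswith (cs.drop (pvWsLoop cs r)) pvChunkM then
        pvALoop cs (pvWsLoop cs r + pvChunkM.length)
      else if PySem.Chars.startswith (cs.drop (pvWsLoop cs r)) pvImgM then
        pvALoop cs (pvWsLoop cs r + pvImgM.length)
      else if pvWsLoop cs r ≠ r then
        pvALoop cs (pvWsLoop cs r)
      else
        pvWsLoop cs r := by
  unfold pvALoop
  simp only [pvALoopF]
  have hle := pvWsLoop_le cs r
  by_cases hc : PySem.Chars.startswith (cs.drop (pvWsLoop cs r)) pvChunkM = true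
  · rw [if_pos hc, if_pos hc]
    have hlen : pvChunkM.length ≤ (cs.drop (pvWsLoop cs r)).length :=
      ((PySem.Chars.startswith_iff _ _).mp hc).length_le
    have h13 : pvChunkM.length = 13 := rfl
    simp only [List.length_drop] at hlen
    exact pvALoopF_congr cs cs.length (cs.length + 1) _ (by omega) (by omega)
  · rw [if_neg hc, if_neg hc]
    by_cases hi : PySem.Chars.startswith (cs.drop (pvWsLoop cs r)) pvImgM = true
    · rw [if_pos hi, if_pos hi]
      have hlen : pvImgM.length ≤ (cs.drop (pvWsLoop cs r)).length :=
        ((PySem.Chars.startswith_iff _ _).mp hi).length_le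
      have h13 : pvImgM.length = 13 := rfl
      simp only [List.length_drop] at hlen
      exact pvALoopF_congr cs cs.length (cs.length + 1) _ (by omega) (by omega)
    · rw [if_neg hi, if_neg hi]
      by_cases hne : pvWsLoop cs r ≠ r
      · rw [if_pos hne, if_pos hne]
        have hrlt : r < cs.length := by
          by_contra hge
          exact hne (pvWsLoop_eq_of_ge cs r (by omega))
        exact pvALoopF_congr cs cs.length (cs.length + 1) _ (by omega) (by omega)
      · rw [if_neg hne, if_neg hne]

-- the whitespace loop stops on a non-space (or at the end)
theorem pvWsLoop_stop (cs : List Char) (r : Nat) :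
    ∀ c, cs[pvWsLoop cs r]? = some c → PySem.Chars.isspace c = false := by
  cases h : cs[r]? with
  | none =>
    rw [pvWsLoop_none cs r h]
    intro d hd
    rw [h] at hd
    simp at hd
  | some c =>
    rw [pvWsLoop_some cs r c h]
    split_ifs with hws
    · exact pvWsLoop_stop cs (r + 1)
    · intro d hd
      rw [h] at hd
      injection hd with e
      subst e
      simpa using hws
termination_by cs.length - r
decreasing_by
  have : r < cs.length := (List.getElem?_eq_some_iff.mp h).1
  omega

theorem pvWsLoop_idem (cs : List Char) (r : Nat) :
    pvWsLoop cs (pvWsLoop cs r) = pvWsLoop cs r := by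
  cases h : cs[pvWsLoop cs r]? with
  | none => exact pvWsLoop_none cs _ h
  | some c =>
    rw [pvWsLoop_some cs _ c h, if_neg]
    simp [pvWsLoop_stop cs r c h]

-- A's loop is the identity at a non-whitespace, non-marker fixed point
theorem pvALoop_fix (cs : List Char) (r : Nat) (hws : pvWsLoop cs r = r)
    (hm : ¬ pvP cs r) : pvALoop cs r = r := by
  rw [pvALoop_step, hws]
  rw [if_neg (fun hc => hm (Or.inl ((PySem.Chars.startswith_iff _ _).mp hc))),
    if_neg (fun hi => hm (Or.inr ((PySem.Chars.startswith_iff _ _).mp hi))),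
    if_neg (by omega)]

-- if no marker starts where the whitespace skip lands, A's loop = the whitespace skip
theorem pvALoop_stop (cs : List Char) (r : Nat) (hm : ¬ pvP cs (pvWsLoop cs r)) :
    pvALoop cs r = pvWsLoop cs r := by
  rw [pvALoop_step]
  rw [if_neg (fun hc => hm (Or.inl ((PySem.Chars.startswith_iff _ _).mp hc))),
    if_neg (fun hi => hm (Or.inr ((PySem.Chars.startswith_iff _ _).mp hi)))]
  by_cases hne : pvWsLoop cs r ≠ r
  · rw [if_pos hne]
    exact pvALoop_fix cs (pvWsLoop cs r) (pvWsLoop_idem cs r) hm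
  · rw [if_neg hne]

-- ---- occurrence-list lemmas (B side) ----

theorem pvOccF_congr (cs : List Char) (f1 : Nat) :
    ∀ (f2 i : Nat), cs.length - i < f1 → cs.length - i < f2 →
      pvOccF cs f1 i = pvOccF cs f2 i := by
  induction f1 with
  | zero => intro f2 i h1 h2; omega
  | succ a ih =>
    intro f2 i h1 h2
    cases f2 with
    | zero => omega
    | succ b =>
      simp only [pvOccF]
      by_cases hlt : i < cs.length
      · rw [if_pos hlt, if_pos hlt]
        by_cases hcond : (PySem.Chars.startswith (cs.drop i) pvChunkM ||
            PySem.Chars.startswith (cs.drop i) pvImgM) = true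
        · rw [if_pos hcond, if_pos hcond, ih b (i + 13) (by omega) (by omega)]
        · rw [if_neg hcond, if_neg hcond]
          exact ih b (i + 1) (by omega) (by omega)
      · rw [if_neg hlt, if_neg hlt]

theorem pvOcc_step (cs : List Char) (i : Nat) :
    pvOcc cs i =
      if i < cs.length then
        if PySem.Chars.startswith (cs.drop i) pvChunkM || PySem.Chars.startswith (cs.drop i) pvImgM then
          i :: pvOcc cs (i + 13)
        else pvOcc cs (i + 1)
      else [] := by
  have h0 : pvOcc cs i = pvOccF cs (cs.length + 1) i := rfl
  rw [h0]
  simp only [pvOccF]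
  by_cases hlt : i < cs.length
  · rw [if_pos hlt, if_pos hlt]
    by_cases hcond : (PySem.Chars.startswith (cs.drop i) pvChunkM ||
        PySem.Chars.startswith (cs.drop i) pvImgM) = true
    · rw [if_pos hcond, if_pos hcond,
        pvOccF_congr cs cs.length (cs.length + 1) (i + 13) (by omega) (by omega)]
      rfl
    · rw [if_neg hcond, if_neg hcond]
      exact pvOccF_congr cs cs.length (cs.length + 1) (i + 1) (by omega) (by omega)
  · rw [if_neg hlt, if_neg hlt]

theorem pvOcc_nil (cs : List Char) (i : Nat) (h : pvOcc cs i = []) :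
    ∀ j, i ≤ j → ¬ pvP cs j := by
  intro j hij hP
  rw [pvOcc_step] at h
  by_cases hlt : i < cs.length
  · rw [if_pos hlt] at h
    by_cases hcond : (PySem.Chars.startswith (cs.drop i) pvChunkM ||
        PySem.Chars.startswith (cs.drop i) pvImgM) = true
    · rw [if_pos hcond] at h
      exact List.cons_ne_nil _ _ h
    · rw [if_neg hcond] at h
      rcases Nat.eq_or_lt_of_le hij with he | hlt2
      · exact hcond ((pvP_iff_cond cs i).mpr (he ▸ hP))
      · exact pvOcc_nil cs (i + 1) h j (by omega) hP
  · rw [if_neg hlt] at h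
    have := (pvP_facts hP).1
    omega
termination_by cs.length - i

theorem pvOcc_cons (cs : List Char) (i l : Nat) (rest : List Nat)
    (h : pvOcc cs i = l :: rest) :
    i ≤ l ∧ pvP cs l ∧ (∀ j, i ≤ j → j < l → ¬ pvP cs j) ∧ rest = pvOcc cs (l + 13) := by
  rw [pvOcc_step] at h
  by_cases hlt : i < cs.length
  · rw [if_pos hlt] at h
    by_cases hcond : (PySem.Chars.startswith (cs.drop i) pvChunkM ||
        PySem.Chars.startswith (cs.drop i) pvImgM) = true
    · rw [if_pos hcond] at h
      injection h with h1 h2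
      subst h1
      exact ⟨Nat.le_refl i, (pvP_iff_cond cs i).mp hcond,
        fun j hij hji => by omega, h2.symm⟩
    · rw [if_neg hcond] at h
      obtain ⟨h1, h2, h3, h4⟩ := pvOcc_cons cs (i + 1) l rest h
      refine ⟨by omega, h2, ?_, h4⟩
      intro j hij hji hP
      rcases Nat.eq_or_lt_of_le hij with he | hlt2
      · exact hcond ((pvP_iff_cond cs i).mpr (he ▸ hP))
      · exact h3 j (by omega) hji hP
  · rw [if_neg hlt] at h
    exact absurd h (by simp)
termination_by cs.length - i

-- ---- whitespace characterisations ----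

theorem pvLstrip_eq (l : List Char) :
    PySem.Chars.lstrip l = l.dropWhile PySem.Chars.isspace := rfl

-- B's lstrip-length arithmetic computes exactly A's whitespace skip
theorem pvWsLoop_eq_lstrip (cs : List Char) (r : Nat) :
    pvWsLoop cs r = r + ((cs.drop r).length - ((cs.drop r).dropWhile PySem.Chars.isspace).length) := by
  cases h : cs[r]? with
  | none =>
    have hge : cs.length ≤ r := List.getElem?_eq_none_iff.mp h
    rw [pvWsLoop_none cs r h, List.drop_eq_nil_of_le hge]
    simp
  | some c =>
    have hr : r < cs.length := (List.getElem?_eq_some_iff.mp h).1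
    have hc : cs[r] = c := by
      have := (List.getElem?_eq_some_iff.mp h).2
      simpa using this
    have hdrop : cs.drop r = c :: cs.drop (r + 1) := by
      rw [List.drop_eq_getElem_cons hr, hc]
    rw [pvWsLoop_some cs r c h, hdrop]
    by_cases hws : PySem.Chars.isspace c = true
    · rw [if_pos hws, List.dropWhile_cons_of_pos hws]
      have hle := List.length_dropWhile_le PySem.Chars.isspace (cs.drop (r + 1))
      rw [pvWsLoop_eq_lstrip cs (r + 1)]
      simp only [List.length_cons]
      omega
    · rw [if_neg hws, List.dropWhile_cons_of_neg (by simpa using hws)]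
      simp
termination_by cs.length - r
decreasing_by
  have : r < cs.length := (List.getElem?_eq_some_iff.mp h).1
  omega

-- pvWsLoop lands at p when [r,p) is all whitespace and p is not
theorem pvWsLoop_first (cs : List Char) (p : Nat) (c : Char) (hc : cs[p]? = some c)
    (hcw : PySem.Chars.isspace c = false) :
    ∀ r, r ≤ p → (∀ k, r ≤ k → k < p → ∃ d, cs[k]? = some d ∧ PySem.Chars.isspace d = true) →
      pvWsLoop cs r = p := by
  intro r hrp hall
  rcases Nat.eq_or_lt_of_le hrp with he | hlt
  · subst he
    rw [pvWsLoop_some cs r c hc, if_neg (by simp [hcw])]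
  · obtain ⟨d, hd, hdw⟩ := hall r (Nat.le_refl r) hlt
    rw [pvWsLoop_some cs r d hd, if_pos hdw]
    exact pvWsLoop_first cs p c hc hcw (r + 1) (by omega)
      (fun k hk1 hk2 => hall k (by omega) hk2)
termination_by r => p - r

-- pvWsLoop never passes a non-whitespace character
theorem pvWsLoop_le_of_nonws (cs : List Char) (q : Nat) (c : Char) (hc : cs[q]? = some c)
    (hcw : PySem.Chars.isspace c = false) :
    ∀ r, r ≤ q → pvWsLoop cs r ≤ q := by
  intro r hrq
  rcases Nat.eq_or_lt_of_le hrq with he | hlt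
  · subst he
    rw [pvWsLoop_some cs r c hc, if_neg (by simp [hcw])]
  · cases h : cs[r]? with
    | none => rw [pvWsLoop_none cs r h]; omega
    | some d =>
      rw [pvWsLoop_some cs r d h]
      split_ifs with hws
      · exact pvWsLoop_le_of_nonws cs q c hc hcw (r + 1) (by omega)
      · omega
termination_by r => q - r

-- strip l = [] iff every character of l is whitespace
theorem pvStrip_nil_iff (l : List Char) :
    PySem.Chars.strip l = [] ↔ ∀ x ∈ l, PySem.Chars.isspace x = true := by
  have hdef : PySem.Chars.strip l =
      ((l.dropWhile PySem.Chars.isspace).reverse.dropWhile PySem.Chars.isspace).reverse := rfl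
  rw [hdef, List.reverse_eq_nil_iff, List.dropWhile_eq_nil_iff]
  constructor
  · intro h x hx
    rcases List.mem_append.mp ((List.takeWhile_append_dropWhile (p := PySem.Chars.isspace) (l := l)) ▸ hx) with h1 | h1
    · exact List.mem_takeWhile_imp h1
    · exact h x (List.mem_reverse.mpr h1)
  · intro h x hx
    exact h x ((List.dropWhile_sublist _).mem (List.mem_reverse.mp hx))

-- ---- the central bridge: A's pointer loop = whitespace skip after B's gap fusion ----

theorem pvMain_eq (cs : List Char) : ∀ r, pvALoop cs r = pvWsLoop cs (pvGap cs (pvOcc cs r) r) := by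
  intro r
  cases hocc : pvOcc cs r with
  | nil =>
    simp only [pvGap]
    have hno := pvOcc_nil cs r hocc
    exact pvALoop_stop cs r (hno _ (pvWsLoop_le cs r))
  | cons p rest =>
    obtain ⟨hrp, hP, hmin, hrest⟩ := pvOcc_cons cs r p rest hocc
    obtain ⟨hplen, hpbr⟩ := pvP_facts hP
    simp only [pvGap]
    by_cases hgap : PySem.Chars.strip (PySem.Chars.slice cs (some (r : Int)) (some (p : Int))) = []
    · rw [if_neg (by simpa using hgap)]
      -- all of [r,p) is whitespace, so the whitespace skip lands exactly at p
      have hall : ∀ k, r ≤ k → k < p → ∃ d, cs[k]? = some d ∧ PySem.Chars.isspace d = true := by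
        intro k hk1 hk2
        have hk3 : k < cs.length := by omega
        have hmem : cs[k] ∈ PySem.Chars.slice cs (some (r : Int)) (some (p : Int)) := by
          rw [PySem.Chars.slice_eq_listSlice, PySem.List.slice_natCast]
          have hidx : k - r < ((cs.drop r).take (p - r)).length := by
            simp only [List.length_take, List.length_drop]
            omega
          have : ((cs.drop r).take (p - r))[k - r] = cs[k]'hk3 := by
            rw [List.getElem_take, List.getElem_drop]
            congr 1
            omega
          exact this ▸ List.getElem_mem hidx
        exact ⟨cs[k], List.getElem?_eq_some_iff.mpr ⟨hk3, rfl⟩,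
          (pvStrip_nil_iff _).mp (by simpa using hgap) _ hmem⟩
      have hws : pvWsLoop cs r = p :=
        pvWsLoop_first cs p '[' hpbr (by decide) r hrp hall
      -- A consumes the marker at p and recurses at p + 13
      have hstep : pvALoop cs r = pvALoop cs (p + 13) := by
        rw [pvALoop_step, hws]
        have h13c : pvChunkM.length = 13 := rfl
        have h13i : pvImgM.length = 13 := rfl
        rcases hP with hch | him
        · rw [if_pos ((PySem.Chars.startswith_iff _ _).mpr hch), h13c]
        · have hnc : ¬ PySem.Chars.startswith (cs.drop p) pvChunkM = true := by
            intro hc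
            -- both markers start '[' but differ at offset 1, so chunk cannot also match
            obtain ⟨t1, ht1⟩ := (PySem.Chars.startswith_iff _ _).mp hc
            obtain ⟨t2, ht2⟩ := him
            rw [← ht2] at ht1
            have := congrArg (fun l => l[1]? ) ht1
            simp [pvChunkM, pvImgM] at this
          rw [if_neg hnc, if_pos ((PySem.Chars.startswith_iff _ _).mpr him), h13i]
      rw [hstep, hrest, pvMain_eq cs (p + 13)]
    · rw [if_pos (by simpa using hgap)]
      -- the gap has a non-whitespace character, so the skip stops before p with no marker there
      have hex : ∃ k, r ≤ k ∧ k < p ∧ ∃ d, cs[k]? = some d ∧ PySem.Chars.isspace d = false := by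
        by_contra hcon
        apply hgap
        rw [PySem.Chars.slice_eq_listSlice, PySem.List.slice_natCast]
        rw [pvStrip_nil_iff]
        intro x hx
        obtain ⟨j, hj, hxj⟩ := List.mem_iff_getElem.mp hx
        have hj1 : j < p - r := by
          have := hj
          simp only [List.length_take, List.length_drop] at this
          omega
        have hj2 : r + j < cs.length := by
          have := hj
          simp only [List.length_take, List.length_drop] at this
          omega
        have hval : x = cs[r + j]'hj2 := by
          rw [← hxj, List.getElem_take, List.getElem_drop]
        by_contra hxw
        exact hcon ⟨r + j, by omega, by omega,
          cs[r + j], List.getElem?_eq_some_iff.mpr ⟨hj2, rfl⟩,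
          by rw [← hval]; simpa using hxw⟩
      obtain ⟨k, hk1, hk2, d, hd, hdw⟩ := hex
      have hqk : pvWsLoop cs r ≤ k := pvWsLoop_le_of_nonws cs k d hd hdw r hk1
      refine pvALoop_stop cs r ?_
      exact hmin (pvWsLoop cs r) (pvWsLoop_le cs r) (by omega)
termination_by r => cs.length - r
decreasing_by
  omega

-- a marker start anywhere makes the corresponding find nonnegative
theorem pvFind_nonneg_of_prefix {cs m : List Char} {j : Nat} (h : m <+: cs.drop j) :
    0 ≤ PySem.Chars.find cs m :=
  (PySem.Chars.find_nonneg_iff cs m).mpr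
    ((PySem.Chars.isIn_iff_infix m cs).mp ((PySem.Chars.exists_prefix_drop_iff_isIn m cs).mp ⟨j, h⟩))

theorem pvMin2 (a b : Int) : PySem.List.min? [a, b] id = some (min a b) := by
  by_cases h : b < a
  · rw [min_eq_right h.le]
    simp [PySem.List.min?, h]
  · rw [min_eq_left (not_lt.mp h)]
    simp [PySem.List.min?, h]

theorem pvMin1 (a : Int) : PySem.List.min? [a] id = some a := by
  simp [PySem.List.min?]

-- A's find/min head equals the least pvP position
theorem pvFirst_unique {cs : List Char} {a b : Nat} (ha : pvP cs a) (hb : pvP cs b)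
    (hma : ∀ k, k < a → ¬ pvP cs k) (hmb : ∀ k, k < b → ¬ pvP cs k) : a = b := by
  by_contra hne
  rcases Nat.lt_or_ge a b with h | h
  · exact hmb a h ha
  · exact hma b (by omega) hb

-- ===== VERDICT (by name: the statement is the Claim_ definition above) =====
theorem split_prompt_by_first_marker_block_py_spec : Claim_equal_split_prompt_by_first_marker_block_py := by
  intro prompt _
  unfold Spec_split_prompt_by_first_marker_block_py
  unfold split_prompt_by_first_marker_block_py split_prompt_by_first_marker_block_py_alt
  have hor : (if prompt = "" then "" else prompt) = prompt := by
    split_ifs with h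
    · exact h.symm
    · rfl
  simp only [hor]
  set cs := prompt.toList with hcs
  set fc := PySem.Chars.find cs pvChunkM with hfc
  set fi := PySem.Chars.find cs pvImgM with hfi
  cases hocc : pvOcc cs 0 with
  | nil =>
    -- no marker anywhere: both finds are negative, A takes the empty-idxs branch
    have hno := pvOcc_nil cs 0 hocc
    have hc0 : ¬ (0 : Int) ≤ fc := by
      intro h
      have := (PySem.Chars.find_spec (s := cs) (sub := pvChunkM) h).1
      exact hno _ (Nat.zero_le _) (Or.inl this)
    have hi0 : ¬ (0 : Int) ≤ fi := by
      intro h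
      have := (PySem.Chars.find_spec (s := cs) (sub := pvImgM) h).1
      exact hno _ (Nat.zero_le _) (Or.inr this)
    have hfil : [fc, fi].filter (fun i => decide (0 ≤ i)) = [] := by
      simp [hc0, hi0]
    rw [hfil]
    simp [PySem.List.min?]
  | cons l rest =>
    obtain ⟨_, hP, hmin0, hrest⟩ := pvOcc_cons cs 0 l rest hocc
    have hmin : ∀ k, k < l → ¬ pvP cs k := fun k hk => hmin0 k (Nat.zero_le k) hk
    -- A's l (min of the nonnegative finds) is the least pvP position, i.e. l
    have hAl : ∃ la : Int, PySem.List.min? ([fc, fi].filter (fun i => decide (0 ≤ i))) id = some la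
        ∧ 0 ≤ la ∧ la.toNat = l := by
      by_cases hc0 : (0 : Int) ≤ fc
      · have hcspec := PySem.Chars.find_spec (s := cs) (sub := pvChunkM) hc0
        rw [← hfc] at hcspec
        by_cases hi0 : (0 : Int) ≤ fi
        · have hispec := PySem.Chars.find_spec (s := cs) (sub := pvImgM) hi0
          rw [← hfi] at hispec
          have hfil : [fc, fi].filter (fun i => decide (0 ≤ i)) = [fc, fi] := by
            simp [hc0, hi0]
          refine ⟨min fc fi, by rw [hfil, pvMin2], le_min hc0 hi0, ?_⟩
          have hP' : pvP cs (min fc fi).toNat := by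
            rcases min_cases fc fi with ⟨hmv, _⟩ | ⟨hmv, _⟩
            · rw [hmv]; exact Or.inl hcspec.1
            · rw [hmv]; exact Or.inr hispec.1
          have hmin' : ∀ k, k < (min fc fi).toNat → ¬ pvP cs k := by
            intro k hk hp
            have h1 : (min fc fi).toNat ≤ fc.toNat := Int.toNat_le_toNat (min_le_left _ _)
            have h2 : (min fc fi).toNat ≤ fi.toNat := Int.toNat_le_toNat (min_le_right _ _)
            rcases hp with hp | hp
            · exact hcspec.2 k (by omega) hp
            · exact hispec.2 k (by omega) hp
          exact pvFirst_unique hP' hP hmin' hmin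
        · have hnoimg : ∀ j : Nat, ¬ pvImgM <+: cs.drop j := by
            intro j hp
            exact hi0 (hfi ▸ pvFind_nonneg_of_prefix hp)
          have hfil : [fc, fi].filter (fun i => decide (0 ≤ i)) = [fc] := by
            simp [hc0, hi0]
          refine ⟨fc, by rw [hfil, pvMin1], hc0, ?_⟩
          refine pvFirst_unique (Or.inl hcspec.1) hP ?_ hmin
          intro k hk hp
          rcases hp with hp | hp
          · exact hcspec.2 k hk hp
          · exact hnoimg k hp
      · have hnochunk : ∀ j : Nat, ¬ pvChunkM <+: cs.drop j := by
          intro j hp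
          exact hc0 (hfc ▸ pvFind_nonneg_of_prefix hp)
        by_cases hi0 : (0 : Int) ≤ fi
        · have hispec := PySem.Chars.find_spec (s := cs) (sub := pvImgM) hi0
          rw [← hfi] at hispec
          have hfil : [fc, fi].filter (fun i => decide (0 ≤ i)) = [fi] := by
            simp [hc0, hi0]
          refine ⟨fi, by rw [hfil, pvMin1], hi0, ?_⟩
          refine pvFirst_unique (Or.inr hispec.1) hP ?_ hmin
          intro k hk hp
          rcases hp with hp | hp
          · exact hnochunk k hp
          · exact hispec.2 k hk hp
        · exfalso
          rcases hP with hp | hp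
          · exact hnochunk l hp
          · exact hi0 (hfi ▸ pvFind_nonneg_of_prefix hp)
    obtain ⟨la, hla, hla0, hlal⟩ := hAl
    rw [hla]
    simp only
    -- identify A's r with B's r
    have hr : pvALoop cs la.toNat = pvGap cs rest (l + 13)
        + ((cs.drop (pvGap cs rest (l + 13))).length
          - ((cs.drop (pvGap cs rest (l + 13))).dropWhile PySem.Chars.isspace).length) := by
      rw [hlal, pvMain_eq cs l]
      have hOccl : pvOcc cs l = l :: pvOcc cs (l + 13) := by
        rw [pvOcc_step, if_pos (by have := (pvP_facts hP).1; omega),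
          if_pos ((pvP_iff_cond cs l).mpr hP)]
      rw [hOccl, ← hrest]
      have hself : PySem.Chars.strip (PySem.Chars.slice cs (some (l : Int)) (some (l : Int))) = [] := by
        rw [PySem.Chars.slice_eq_listSlice, PySem.List.slice_natCast, Nat.sub_self,
          List.take_zero]
        rfl
      simp only [pvGap, hself]
      rw [if_neg (by simp)]
      exact pvWsLoop_eq_lstrip cs (pvGap cs rest (l + 13))
    have hlaeq : la = (l : Int) := by omega
    rw [hr]
    simp only [PySem.Chars.slice_eq_listSlice, pvLstrip_eq, PySem.List.slice_from_natCast, hlaeq]
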